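-- pv_equiv track=rewrite | github.com/kisk0419/algolithm_learning | Coding-Quiz/snake_string.py | snake_string_v1
-- ===== SOURCE A (Python) =====
-- from typing import List
--
-- def snake_string_v1(chars: str) -> List[List[str]]:
--     result = [[], [], []]
--     result_idexes = {0, 1, 2}
--     insert_index = 1
--     for i, s in enumerate(chars):
--         if i % 4 == 1:
--             insert_index = 0
--         elif i % 2 == 0:
--             insert_index = 1
--         elif i % 4 == 3:
--             insert_index = 2
--         result[insert_index].append(s)
--         for rest_index in result_idexes - {insert_index}:
--             result[rest_index].append(' ')
--     return result
-- ===== SOURCE B (Python) =====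
-- def snake_string_v1(chars):
--     return [
--         [c if i % 4 == 1 else ' ' for i, c in enumerate(chars)],
--         [c if i % 2 == 0 else ' ' for i, c in enumerate(chars)],
--         [c if i % 4 == 3 else ' ' for i, c in enumerate(chars)],
--     ]
-- ===== Notes on version B (the rewrite author's own statement) =====
-- stated objective: simpler
-- what changed: Row-major decomposition: each of the three rows is built by its own comprehension with a modular predicate, instead of A's char-major pass carrying an insert_index and padding the other rows via a set difference. (constant-factor speedup from dropping the per-char set difference and carried state)
import Mathlib
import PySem

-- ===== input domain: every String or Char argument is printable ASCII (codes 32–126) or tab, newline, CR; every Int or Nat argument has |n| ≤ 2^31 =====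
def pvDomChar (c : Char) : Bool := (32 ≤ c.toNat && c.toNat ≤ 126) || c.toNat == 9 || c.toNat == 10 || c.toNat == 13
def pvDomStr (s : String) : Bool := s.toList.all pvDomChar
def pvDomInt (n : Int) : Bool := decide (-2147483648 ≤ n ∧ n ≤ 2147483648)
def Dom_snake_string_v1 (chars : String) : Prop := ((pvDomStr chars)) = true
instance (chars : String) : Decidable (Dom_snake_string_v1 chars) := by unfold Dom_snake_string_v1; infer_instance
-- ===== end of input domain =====

-- B builds each row independently (row-major, three modular predicates) instead of A's
-- char-major single pass with a carried insert_index and set-difference padding; objective: simpler.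

-- ===== PORT A =====
-- one loop step of A: reassign insert_index from i, append s to that row and ' ' to the two others
def snakeA_step (st : List String × List String × List String × Int) (p : Int × Char)
    : List String × List String × List String × Int :=
  let (r0, r1, r2, ins) := st
  let (i, s) := p
  let ins := if PySem.Int.mod i 4 == 1 then (0 : Int)
             else if PySem.Int.mod i 2 == 0 then 1
             else if PySem.Int.mod i 4 == 3 then 2
             else ins
  (if ins == 0 then r0 ++ [String.ofList [s]] else r0 ++ [" "],
   if ins == 1 then r1 ++ [String.ofList [s]] else r1 ++ [" "],
   if ins == 2 then r2 ++ [String.ofList [s]] else r2 ++ [" "],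
   ins)

def snake_string_v1 (chars : String) : List (List String) :=
  let st := (PySem.List.enumerate chars.toList).foldl snakeA_step ([], [], [], (1 : Int))
  [st.1, st.2.1, st.2.2.1]

-- ===== PORT B =====
def snake_string_v1_alt (chars : String) : List (List String) :=
  let cs := PySem.List.enumerate chars.toList
  [cs.map (fun p => if PySem.Int.mod p.1 4 == 1 then String.ofList [p.2] else " "),
   cs.map (fun p => if PySem.Int.mod p.1 2 == 0 then String.ofList [p.2] else " "),
   cs.map (fun p => if PySem.Int.mod p.1 4 == 3 then String.ofList [p.2] else " ")]

-- ===== PRECONDITION & SPEC =====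
def Spec_snake_string_v1 (chars : String) (out : List (List String)) : Prop := out = snake_string_v1_alt chars
instance (chars : String) (out : List (List String)) : Decidable (Spec_snake_string_v1 chars out) := by unfold Spec_snake_string_v1; infer_instance

-- ===== CLAIM (what is proved, stated in full; the proofs are below) =====
def Claim_equal_snake_string_v1 : Prop := ∀ (chars : String), Dom_snake_string_v1 chars → Spec_snake_string_v1 chars (snake_string_v1 chars)

-- ===== LEMMAS AND PROOFS =====

-- the step's per-row conditions coincide with B's three modular predicates
theorem snakeA_step_eq (r0 r1 r2 : List String) (ins i : Int) (s : Char) :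
    snakeA_step (r0, r1, r2, ins) (i, s) =
      (r0 ++ [if PySem.Int.mod i 4 == 1 then String.ofList [s] else " "],
       r1 ++ [if PySem.Int.mod i 2 == 0 then String.ofList [s] else " "],
       r2 ++ [if PySem.Int.mod i 4 == 3 then String.ofList [s] else " "],
       if PySem.Int.mod i 4 == 1 then (0 : Int)
       else if PySem.Int.mod i 2 == 0 then 1 else 2) := by
  have h4 : PySem.Int.mod i 4 = i % 4 := PySem.Int.mod_eq_emod_of_pos (by omega)
  have h2 : PySem.Int.mod i 2 = i % 2 := PySem.Int.mod_eq_emod_of_pos (by omega)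
  have h24 : i % 2 = (i % 4) % 2 := by omega
  have hb4 : 0 ≤ i % 4 ∧ i % 4 < 4 := ⟨Int.emod_nonneg _ (by omega), Int.emod_lt_of_pos _ (by omega)⟩
  obtain ⟨hl, hr⟩ := hb4
  simp only [snakeA_step, h4, h2]
  interval_cases h : (i % 4) <;> simp [h24, h]

theorem snakeA_loop (l : List (Int × Char)) : ∀ (r0 r1 r2 : List String) (ins : Int),
    ∃ ins', l.foldl snakeA_step (r0, r1, r2, ins) =
      (r0 ++ l.map (fun p => if PySem.Int.mod p.1 4 == 1 then String.ofList [p.2] else " "),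
       r1 ++ l.map (fun p => if PySem.Int.mod p.1 2 == 0 then String.ofList [p.2] else " "),
       r2 ++ l.map (fun p => if PySem.Int.mod p.1 4 == 3 then String.ofList [p.2] else " "),
       ins') := by
  induction l with
  | nil => intro r0 r1 r2 ins; exact ⟨ins, by simp⟩
  | cons p t ih =>
      intro r0 r1 r2 ins
      obtain ⟨i, s⟩ := p
      rw [List.foldl_cons, snakeA_step_eq]
      obtain ⟨ins', hins'⟩ :=
        ih (r0 ++ [if PySem.Int.mod i 4 == 1 then String.ofList [s] else " "])
           (r1 ++ [if PySem.Int.mod i 2 == 0 then String.ofList [s] else " "])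
           (r2 ++ [if PySem.Int.mod i 4 == 3 then String.ofList [s] else " "])
           (if PySem.Int.mod i 4 == 1 then (0 : Int)
            else if PySem.Int.mod i 2 == 0 then 1 else 2)
      exact ⟨ins', by simpa [List.append_assoc] using hins'⟩

-- ===== VERDICT (by name: the statement is the Claim_ definition above) =====
theorem snake_string_v1_spec : Claim_equal_snake_string_v1 := by
  intro chars _
  unfold Spec_snake_string_v1 snake_string_v1 snake_string_v1_alt
  obtain ⟨ins', h⟩ := snakeA_loop (PySem.List.enumerate chars.toList) [] [] [] 1
  simp [h]
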